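-- pv_equiv track=rewrite | github.com/eunseongc/SpaDE | utils/Tool.py | cleanQ
-- ===== SOURCE A (Python) =====
-- printableD = set('0123456789abcdefghijklmnopqrstuvwxyzABCDEFGHIJKLMNOPQRSTUVWXYZ.- ')
--
-- printable3D = set('0123456789abcdefghijklmnopqrstuvwxyzABCDEFGHIJKLMNOPQRSTUVWXYZ.- ')
--
-- STOPLIST = {}
--
-- def cleanQ(s, join=True):
--     s = [(x.lower() if x in printable3D else ' ') for x in s]
--     s = [(x if x in printableD else ' ' + x + ' ') for x in s]
--     s = ''.join(s).split()
--     s = [(w if '.' not in w else (' ' if len(max(w.split('.'), key=len)) > 1 else '').join(w.split('.'))) for w in s]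
--     s = ' '.join(s).split()
--     s = [(w if '-' not in w else (' ' if len(min(w.split('-'), key=len)) > 1 else '').join(w.split('-'))) for w in s]
--     s = ' '.join(s).split()
--     s = [w for w in s if w not in STOPLIST]
--
--     return ' '.join(s) if join else s
-- ===== SOURCE B (Python) =====
-- printableD = set('0123456789abcdefghijklmnopqrstuvwxyzABCDEFGHIJKLMNOPQRSTUVWXYZ.- ')
--
-- printable3D = set('0123456789abcdefghijklmnopqrstuvwxyzABCDEFGHIJKLMNOPQRSTUVWXYZ.- ')
--
-- STOPLIST = {}
--
--
-- def _dot(w):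
--     # split one whitespace-free token on '.', re-splitting when parts are joined with spaces
--     if '.' not in w:
--         return [w]
--     parts = w.split('.')
--     sep = ' ' if len(max(parts, key=len)) > 1 else ''
--     return sep.join(parts).split()
--
--
-- def _dash(w):
--     # same for '-', with the min-length rule
--     if '-' not in w:
--         return [w]
--     parts = w.split('-')
--     sep = ' ' if len(min(parts, key=len)) > 1 else ''
--     return sep.join(parts).split()
--
--
-- def cleanQ(s, join=True):
--     # one normalization pass, then a per-token pipeline, flattened once
--     norm = ''.join(c.lower() if c in printable3D else ' ' for c in s)
--     out = [u for w in norm.split() for p in _dot(w) for u in _dash(p)]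
--     return ' '.join(out) if join else out
-- ===== Notes on version B (the rewrite author's own statement) =====
-- stated objective: simpler
-- what changed: A's five sequential whole-list passes (char map, a provably no-op padding pass, global dot pass, global re-split, global dash pass) become one char-normalization pass plus a per-token helper pipeline (_dot then _dash) flattened once; the no-op second pass and the empty-STOPLIST filter are dropped.
-- outside the precondition, e.g. on cleanQ('a.b', False): A returns ['ab'], B returns ['ab']
import Mathlib
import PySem

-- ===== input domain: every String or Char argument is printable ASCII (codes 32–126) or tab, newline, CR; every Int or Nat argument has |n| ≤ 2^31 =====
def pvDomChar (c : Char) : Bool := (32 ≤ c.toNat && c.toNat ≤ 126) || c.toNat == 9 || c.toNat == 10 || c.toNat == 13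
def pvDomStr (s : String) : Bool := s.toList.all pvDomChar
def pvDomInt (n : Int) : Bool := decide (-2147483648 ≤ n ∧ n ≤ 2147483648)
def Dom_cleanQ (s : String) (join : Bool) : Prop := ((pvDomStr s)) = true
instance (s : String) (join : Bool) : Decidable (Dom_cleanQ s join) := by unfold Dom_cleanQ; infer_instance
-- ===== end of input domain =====

-- B replaces A's five whole-list passes by one char-normalization pass plus a per-token
-- helper pipeline flattened once (objective: simpler); return-value equivalence only, and
-- only for join = true (join = false returns a Python list, not a str — see Pre_cleanQ).

-- ===== PORT A =====
-- the two (identical) module-level character sets and the empty STOPLIST dict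
def pvPrintableD : PySem.Set Char :=
  PySem.Set.ofList "0123456789abcdefghijklmnopqrstuvwxyzABCDEFGHIJKLMNOPQRSTUVWXYZ.- ".toList
def pvPrintable3D : PySem.Set Char :=
  PySem.Set.ofList "0123456789abcdefghijklmnopqrstuvwxyzABCDEFGHIJKLMNOPQRSTUVWXYZ.- ".toList
def pvSTOPLIST : PySem.Dict (List Char) (List Char) := PySem.Dict.mk []

def cleanQ (s : String) (join : Bool) : String :=
  let s1 : List Char :=
    s.toList.map (fun x => if x ∈ pvPrintable3D then PySem.Chars.lowerChar x else ' ')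
  let s2 : List (List Char) :=
    s1.map (fun x => if x ∈ pvPrintableD then [x] else [' '] ++ [x] ++ [' '])
  let s3 : List (List Char) := PySem.Chars.split₀ (PySem.Chars.join [] s2)
  let s4 : List (List Char) := s3.map (fun w =>
    if PySem.Chars.isIn ['.'] w then
      PySem.Chars.join
        (if 1 < PySem.Chars.len (PySem.List.maxD (PySem.Chars.splitOn w ['.']) PySem.Chars.len [])
         then [' '] else [])
        (PySem.Chars.splitOn w ['.'])
    else w)
  let s5 : List (List Char) := PySem.Chars.split₀ (PySem.Chars.join [' '] s4)
  let s6 : List (List Char) := s5.map (fun w =>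
    if PySem.Chars.isIn ['-'] w then
      PySem.Chars.join
        (if 1 < PySem.Chars.len (PySem.List.minD (PySem.Chars.splitOn w ['-']) PySem.Chars.len [])
         then [' '] else [])
        (PySem.Chars.splitOn w ['-'])
    else w)
  let s7 : List (List Char) := PySem.Chars.split₀ (PySem.Chars.join [' '] s6)
  let s8 : List (List Char) := s7.filter (fun w => !(pvSTOPLIST.contains w))
  -- with join = false Python returns the token LIST (not a str); excluded by Pre_cleanQ
  String.ofList (PySem.Chars.join [' '] s8)

-- ===== PORT B =====
def pvDot (w : List Char) : List (List Char) :=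
  if PySem.Chars.isIn ['.'] w then
    let parts := PySem.Chars.splitOn w ['.']
    let sep : List Char :=
      if 1 < PySem.Chars.len (PySem.List.maxD parts PySem.Chars.len []) then [' '] else []
    PySem.Chars.split₀ (PySem.Chars.join sep parts)
  else [w]

def pvDash (w : List Char) : List (List Char) :=
  if PySem.Chars.isIn ['-'] w then
    let parts := PySem.Chars.splitOn w ['-']
    let sep : List Char :=
      if 1 < PySem.Chars.len (PySem.List.minD parts PySem.Chars.len []) then [' '] else []
    PySem.Chars.split₀ (PySem.Chars.join sep parts)
  else [w]

def cleanQ_alt (s : String) (join : Bool) : String :=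
  let norm : List Char :=
    s.toList.map (fun c => if c ∈ pvPrintable3D then PySem.Chars.lowerChar c else ' ')
  let out : List (List Char) :=
    (PySem.Chars.split₀ norm).flatMap (fun w => (pvDot w).flatMap pvDash)
  -- with join = false Python returns the token LIST (not a str); excluded by Pre_cleanQ
  String.ofList (PySem.Chars.join [' '] out)

-- ===== PRECONDITION & SPEC =====
-- Pre_ excludes join = false, where both Pythons return a LIST of tokens — not a value of the
-- declared String return type.
def Pre_cleanQ (s : String) (join : Bool) : Prop := join = true
instance (s : String) (join : Bool) : Decidable (Pre_cleanQ s join) := by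
  unfold Pre_cleanQ; infer_instance

def pvWitness_cleanQ : String × Bool := ("A-OK Mr.s X e.g. a-b", true)

def Spec_cleanQ (s : String) (join : Bool) (out : String) : Prop := out = cleanQ_alt s join
instance (s : String) (join : Bool) (out : String) : Decidable (Spec_cleanQ s join out) := by
  unfold Spec_cleanQ; infer_instance

-- ===== CLAIM (what is proved, stated in full; the proofs are below) =====
def Claim_equal_cleanQ : Prop :=
  ∀ (s : String) (join : Bool), Dom_cleanQ s join → Pre_cleanQ s join →
    Spec_cleanQ s join (cleanQ s join)

-- ===== LEMMAS AND PROOFS =====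

-- a token produced by split₀ is nonempty and whitespace-free
def pvClean (w : List Char) : Prop := w ≠ [] ∧ ∀ c ∈ w, PySem.Chars.isspace c = false

theorem pv_go_acc (l cur acc) :
    PySem.Chars.split₀.go l cur acc = acc.reverse ++ PySem.Chars.split₀.go l cur [] := by
  induction l generalizing cur acc with
  | nil => simp only [PySem.Chars.split₀.go]; split <;> simp
  | cons c rest ih =>
    simp only [PySem.Chars.split₀.go]
    by_cases hk : PySem.Chars.isspace c
    · simp only [hk, if_pos]
      by_cases hc : cur.isEmpty
      · simp only [hc, if_pos]
        exact ih [] acc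
      · simp only [hc, if_neg, Bool.false_eq_true, not_false_iff]
        rw [ih [] (cur.reverse :: acc), ih [] [cur.reverse]]
        simp
    · simp only [hk, Bool.false_eq_true, if_neg, not_false_iff]
      exact ih (c :: cur) acc

theorem pv_go_consume (w : List Char) (hw : ∀ c ∈ w, PySem.Chars.isspace c = false)
    (l cur acc) :
    PySem.Chars.split₀.go (w ++ l) cur acc = PySem.Chars.split₀.go l (w.reverse ++ cur) acc := by
  induction w generalizing cur with
  | nil => simp
  | cons c rest ih =>
    have hc : PySem.Chars.isspace c = false := hw c (by simp)
    simp only [List.cons_append, PySem.Chars.split₀.go, hc, Bool.false_eq_true, if_neg,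
      not_false_iff]
    rw [ih (fun x hx => hw x (by simp [hx])) (c :: cur)]
    simp

theorem pv_split₀_nospace (w : List Char) (hne : w ≠ [])
    (hw : ∀ c ∈ w, PySem.Chars.isspace c = false) :
    PySem.Chars.split₀ w = [w] := by
  have := pv_go_consume w hw [] [] []
  simp only [List.append_nil] at this
  simp only [PySem.Chars.split₀, this, PySem.Chars.split₀.go]
  simp [List.isEmpty_iff, hne]

theorem pv_go_split (c : Char) (hc : PySem.Chars.isspace c = true) (b a : List Char)
    (cur : List Char) (acc : List (List Char)) :
    PySem.Chars.split₀.go (a ++ c :: b) cur acc =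
      PySem.Chars.split₀.go a cur acc ++ PySem.Chars.split₀.go b [] [] := by
  induction a generalizing cur acc with
  | nil =>
    simp only [List.nil_append, PySem.Chars.split₀.go, hc, if_pos]
    by_cases hcur : cur.isEmpty
    · simp only [hcur, if_pos]
      rw [pv_go_acc b [] acc]
    · simp only [hcur, Bool.false_eq_true, if_neg, not_false_iff]
      rw [pv_go_acc b [] (cur.reverse :: acc)]
  | cons x a' ih =>
    simp only [List.cons_append, PySem.Chars.split₀.go]
    by_cases hx : PySem.Chars.isspace x
    · simp only [hx, if_pos]
      by_cases hcur : cur.isEmpty <;> simp only [hcur, if_pos, Bool.false_eq_true, if_neg,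
        not_false_iff] <;> exact ih _ _
    · simp only [hx, Bool.false_eq_true, if_neg, not_false_iff]
      exact ih _ _

theorem pv_split₀_append_space (a b : List Char) :
    PySem.Chars.split₀ (a ++ ' ' :: b) = PySem.Chars.split₀ a ++ PySem.Chars.split₀ b := by
  simp only [PySem.Chars.split₀]
  exact pv_go_split ' ' (by decide) b a [] []


theorem pv_split₀_join_space (ts : List (List Char)) :
    PySem.Chars.split₀ (PySem.Chars.join [' '] ts) = ts.flatMap PySem.Chars.split₀ := by
  induction ts with
  | nil => simp [PySem.Chars.join_nil, PySem.Chars.split₀, PySem.Chars.split₀.go]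
  | cons t rest ih =>
    cases rest with
    | nil => simp [PySem.Chars.join_singleton]
    | cons u rest' =>
      rw [PySem.Chars.join_cons_cons]
      have : t ++ [' '] ++ PySem.Chars.join [' '] (u :: rest')
           = t ++ ' ' :: PySem.Chars.join [' '] (u :: rest') := by simp
      rw [this, pv_split₀_append_space, ih]
      simp

theorem pv_mem_split₀ (l : List Char) (w : List Char) (hw : w ∈ PySem.Chars.split₀ l) :
    pvClean w := by
  suffices h : ∀ (l cur : List Char) (acc : List (List Char)),
      (∀ a ∈ acc, pvClean a) → (∀ c ∈ cur, PySem.Chars.isspace c = false) →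
      ∀ w ∈ PySem.Chars.split₀.go l cur acc, pvClean w by
    exact h l [] [] (by simp) (by simp) w hw
  intro l
  induction l with
  | nil =>
    intro cur acc hacc hcur w hw
    simp only [PySem.Chars.split₀.go] at hw
    by_cases hc : cur.isEmpty
    · simp only [hc, if_pos, List.mem_reverse] at hw; exact hacc w hw
    · simp only [hc, Bool.false_eq_true, if_neg, not_false_iff,
        List.mem_reverse, List.mem_cons] at hw
      rcases hw with h | h
      · subst h
        refine ⟨by simpa [List.isEmpty_iff] using hc, fun c hc' => hcur c (by simpa using hc')⟩
      · exact hacc w h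
  | cons c rest ih =>
    intro cur acc hacc hcur w hw
    simp only [PySem.Chars.split₀.go] at hw
    by_cases hk : PySem.Chars.isspace c
    · simp only [hk, if_pos] at hw
      by_cases hc : cur.isEmpty
      · simp only [hc, if_pos] at hw
        exact ih [] acc hacc (by simp) w hw
      · simp only [hc, Bool.false_eq_true, if_neg, not_false_iff] at hw
        refine ih [] (cur.reverse :: acc) ?_ (by simp) w hw
        intro a ha
        rcases List.mem_cons.mp ha with h | h
        · subst h
          exact ⟨by simpa [List.isEmpty_iff] using hc, fun x hx => hcur x (by simpa using hx)⟩
        · exact hacc a h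
    · simp only [hk, Bool.false_eq_true, if_neg, not_false_iff] at hw
      refine ih (c :: cur) acc hacc ?_ w hw
      intro x hx
      rcases List.mem_cons.mp hx with h | h
      · subst h; simpa using hk
      · exact hcur x h

set_option maxRecDepth 20000 in
theorem pv_f1_mem (c : Char) :
    (if c ∈ pvPrintable3D then PySem.Chars.lowerChar c else ' ') ∈ pvPrintableD := by
  by_cases h : c ∈ pvPrintable3D
  · simp only [h, if_pos]
    have hall : ("0123456789abcdefghijklmnopqrstuvwxyzABCDEFGHIJKLMNOPQRSTUVWXYZ.- ".toList).all
        (fun x => decide (PySem.Chars.lowerChar x ∈ pvPrintableD)) = true := by decide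
    exact of_decide_eq_true (List.all_eq_true.mp hall c ((PySem.Set.mem_ofList _ c).mp h))
  · simp only [h, if_neg, not_false_iff]
    decide

theorem pv_dot_token (w : List Char) (hw : pvClean w) :
    PySem.Chars.split₀
      (if PySem.Chars.isIn ['.'] w then
        PySem.Chars.join
          (if 1 < PySem.Chars.len (PySem.List.maxD (PySem.Chars.splitOn w ['.']) PySem.Chars.len [])
           then [' '] else [])
          (PySem.Chars.splitOn w ['.'])
      else w) = pvDot w := by
  by_cases h : PySem.Chars.isIn ['.'] w
  · simp [pvDot, h]
  · simp only [h, Bool.false_eq_true, if_neg, not_false_iff, pvDot]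
    exact pv_split₀_nospace w hw.1 hw.2

theorem pv_dash_token (w : List Char) (hw : pvClean w) :
    PySem.Chars.split₀
      (if PySem.Chars.isIn ['-'] w then
        PySem.Chars.join
          (if 1 < PySem.Chars.len (PySem.List.minD (PySem.Chars.splitOn w ['-']) PySem.Chars.len [])
           then [' '] else [])
          (PySem.Chars.splitOn w ['-'])
      else w) = pvDash w := by
  by_cases h : PySem.Chars.isIn ['-'] w
  · simp [pvDash, h]
  · simp only [h, Bool.false_eq_true, if_neg, not_false_iff, pvDash]
    exact pv_split₀_nospace w hw.1 hw.2

theorem pv_clean_dot (w p : List Char) (hw : pvClean w) (hp : p ∈ pvDot w) : pvClean p := by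
  unfold pvDot at hp
  by_cases h : PySem.Chars.isIn ['.'] w
  · simp only [h, if_pos] at hp
    exact pv_mem_split₀ _ p hp
  · simp only [h, Bool.false_eq_true, if_neg, not_false_iff, List.mem_singleton] at hp
    subst hp; exact hw

theorem pv_main (s : String) (join : Bool) : cleanQ s join = cleanQ_alt s join := by
  dsimp only [cleanQ, cleanQ_alt]
  set s1 := s.toList.map (fun x => if x ∈ pvPrintable3D then PySem.Chars.lowerChar x else ' ')
    with hs1
  -- pass 2 is a no-op
  have h2 : s1.map (fun x => if x ∈ pvPrintableD then [x] else [' '] ++ [x] ++ [' '])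
      = s1.map (fun c => [c]) := by
    refine List.map_congr_left (fun x hx => ?_)
    have : x ∈ pvPrintableD := by
      rw [hs1] at hx
      rcases List.mem_map.mp hx with ⟨c, _, rfl⟩
      exact pv_f1_mem c
    simp [this]
  rw [h2, PySem.Chars.join_nil_singletons]
  -- dot stage
  have hdot : PySem.Chars.split₀ (PySem.Chars.join [' ']
      ((PySem.Chars.split₀ s1).map (fun w =>
        if PySem.Chars.isIn ['.'] w then
          PySem.Chars.join
            (if 1 < PySem.Chars.len (PySem.List.maxD (PySem.Chars.splitOn w ['.']) PySem.Chars.len [])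
             then [' '] else [])
            (PySem.Chars.splitOn w ['.'])
        else w)))
      = (PySem.Chars.split₀ s1).flatMap pvDot := by
    rw [pv_split₀_join_space, List.flatMap_map]
    exact List.flatMap_congr (fun w hw => pv_dot_token w (pv_mem_split₀ s1 w hw))
  rw [hdot]
  -- dash stage
  have hdash : PySem.Chars.split₀ (PySem.Chars.join [' ']
      (((PySem.Chars.split₀ s1).flatMap pvDot).map (fun w =>
        if PySem.Chars.isIn ['-'] w then
          PySem.Chars.join
            (if 1 < PySem.Chars.len (PySem.List.minD (PySem.Chars.splitOn w ['-']) PySem.Chars.len [])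
             then [' '] else [])
            (PySem.Chars.splitOn w ['-'])
        else w)))
      = (PySem.Chars.split₀ s1).flatMap (fun w => (pvDot w).flatMap pvDash) := by
    rw [pv_split₀_join_space, List.flatMap_map]
    have : ∀ w ∈ (PySem.Chars.split₀ s1).flatMap pvDot, pvClean w := by
      intro w hw
      rcases List.mem_flatMap.mp hw with ⟨t, ht, hwt⟩
      exact pv_clean_dot t w (pv_mem_split₀ s1 t ht) hwt
    rw [List.flatMap_congr (fun w hw => pv_dash_token w (this w hw))]
    exact List.flatMap_assoc
  rw [hdash]
  -- empty STOPLIST filter is a no-op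
  have hf : ∀ (l : List (List Char)), l.filter (fun w => !(pvSTOPLIST.contains w)) = l := by
    intro l
    refine List.filter_eq_self.mpr (fun w _ => ?_)
    simp [pvSTOPLIST, PySem.Dict.contains]
  rw [hf]

-- ===== VERDICT (by name: the statement is the Claim_ definition above) =====
theorem cleanQ_spec : Claim_equal_cleanQ := by
  intro s join _ _
  unfold Spec_cleanQ
  exact pv_main s join
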